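-- pv_equiv track=rewrite | github.com/IvanPlis/Programacion_Python | 04_Listas/propaga.py | propagar
-- ===== SOURCE A (Python) =====
-- def propagar(lista_fosforos):
--     """
--     Recibe una lista de fosforos y propaga el fuego de los fosoforos
--     encendidos a sus vecinos (izq y der) si estos estan apagados.
--     Devuelve una lista con los fosforos que se encendieron.
--
--     1: encendido
--     0: apagado
--     -1: consumido (no se pueden encender)
--     """
--
--     # Para no modificar la lista original
--     propagado = copiar_lista(lista_fosforos)
--     # Agrego un elemento mas temporalmente para evitar el index out of range
--     propagado.append(0)
--
--     # Recorro la lista de fosforos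
--     for i, fosforo in enumerate(propagado):
--         # Verifico si esta encendido
--         if fosforo == 1:
--
--             # Propaga el fuego al fosforo de la derecha
--             j = i + 1
--             while propagado[j] == 0 and j < len(propagado) - 1:
--                 propagado[j] = 1
--                 j += 1
--
--             # Propaga al fuego al fosforo de la izquierda
--             j = i - 1
--             while propagado[j] == 0 and j >= 0:
--                 propagado[j] = 1
--                 j -= 1
--
--     # Elimino el elemento extra temporal
--     propagado.pop(len(propagado)-1)
--
--     return propagado
--
-- def copiar_lista(lista_original):
--     copia_lista = []
--     for elemento in lista_original:
--         copia_lista.append(elemento)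
--     return copia_lista
-- ===== SOURCE B (Python) =====
-- def propagar(lista_fosforos):
--     """Single pass with a pending zero-run buffer: flush the run as 1s when it is
--     bounded by a lit match (1) on either side, otherwise keep the zeros."""
--     resultado = []
--     pendientes = 0      # zeros seen and not yet decided
--     izquierda_encendida = False  # element just left of the pending run is 1
--     for fosforo in lista_fosforos:
--         if fosforo == 0:
--             pendientes += 1
--         else:
--             relleno = 1 if (izquierda_encendida or fosforo == 1) else 0
--             resultado.extend([relleno] * pendientes)
--             resultado.append(fosforo)
--             pendientes = 0
--             izquierda_encendida = (fosforo == 1)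
--     resultado.extend([1 if izquierda_encendida else 0] * pendientes)
--     return resultado
-- ===== Notes on version B (the rewrite author's own statement) =====
-- stated objective: alternative
-- what changed: A copies the list, appends a 0 sentinel and, scanning indices, mutates the copy with bidirectional while-loop fills from every lit match; B is a single left-to-right pass that buffers each pending run of zeros and emits it as 1s exactly when the run is bounded by a lit match on either side, building the output list directly with no sentinel and no mutation.
import Mathlib
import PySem

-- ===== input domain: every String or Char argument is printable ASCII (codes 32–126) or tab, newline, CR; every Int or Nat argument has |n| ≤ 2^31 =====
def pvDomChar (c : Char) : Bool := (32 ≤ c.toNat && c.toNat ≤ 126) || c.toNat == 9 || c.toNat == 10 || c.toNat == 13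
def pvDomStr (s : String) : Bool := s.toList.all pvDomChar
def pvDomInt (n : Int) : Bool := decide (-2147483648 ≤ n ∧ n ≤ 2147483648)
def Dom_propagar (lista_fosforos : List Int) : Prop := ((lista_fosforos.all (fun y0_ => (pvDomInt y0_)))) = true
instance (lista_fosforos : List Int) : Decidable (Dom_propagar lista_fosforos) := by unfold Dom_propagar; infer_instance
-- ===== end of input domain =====

-- B replaces A's mutate-a-copy-with-sentinel bidirectional fills by a single pass that
-- buffers each pending zero-run and flushes it as 1s exactly when a lit neighbour bounds it
-- (objective: alternative decomposition; neither side mutates the argument list).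

-- ===== PORT A =====
def copiar_lista (lista_original : List Int) : List Int :=
  lista_original.foldl (fun copia_lista elemento => copia_lista ++ [elemento]) []

-- while propagado[j] == 0 and j < len(propagado) - 1: propagado[j] = 1; j += 1
def fillDer (propagado : List Int) (j : Nat) : List Int :=
  if h : PySem.List.pyGet? propagado (j : Int) = some 0 ∧ j < propagado.length - 1 then
    fillDer (propagado.set j 1) (j + 1)
  else propagado
termination_by propagado.length - j
decreasing_by simp only [List.length_set]; omega

-- while propagado[j] == 0 and j >= 0: propagado[j] = 1; j -= 1
-- (propagado[j] is read first; at j = -1 Python reads the last element via wraparound and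
--  the 'j >= 0' conjunct then stops the loop, so nothing is written — pyGet? is exact here)
def fillIzq (propagado : List Int) (j : Int) : List Int :=
  if h : PySem.List.pyGet? propagado j = some 0 ∧ 0 ≤ j then
    fillIzq (propagado.set j.toNat 1) (j - 1)
  else propagado
termination_by (j + 1).toNat
decreasing_by omega

-- for i, fosforo in enumerate(propagado): …  — the list is mutated in place but its length never
-- changes, so the iteration visits exactly the indices range(len(propagado)), reading the CURRENT
-- list at each index (foldl state)
def recorrer (propagado : List Int) : List Int :=
  (PySem.List.pyRange 0 (propagado.length : Int) 1).foldl
    (fun l i =>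
      if PySem.List.pyGet? l i = some 1 then
        fillIzq (fillDer l (i.toNat + 1)) (i - 1)
      else l)
    propagado

def propagar (lista_fosforos : List Int) : List Int :=
  let propagado := copiar_lista lista_fosforos ++ [0]
  let r := recorrer propagado
  -- propagado.pop(len(propagado) - 1); the list is nonempty, so pop? always succeeds
  match PySem.List.pop? r ((r.length : Int) - 1) with
  | some p => p.2
  | none => r

-- ===== PORT B =====
def propagarAltLoop (resultado : List Int) (pendientes : Nat) (izquierda_encendida : Bool) :
    List Int → List Int
  | [] => resultado ++ List.replicate pendientes (if izquierda_encendida then (1 : Int) else 0)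
  | fosforo :: resto =>
      if fosforo = 0 then
        propagarAltLoop resultado (pendientes + 1) izquierda_encendida resto
      else
        propagarAltLoop
          (resultado ++
            List.replicate pendientes
              (if izquierda_encendida || decide (fosforo = 1) then (1 : Int) else 0) ++ [fosforo])
          0 (decide (fosforo = 1)) resto

def propagar_alt (lista_fosforos : List Int) : List Int :=
  propagarAltLoop [] 0 false lista_fosforos

-- ===== PRECONDITION & SPEC =====
def Spec_propagar (lista_fosforos : List Int) (out : List Int) : Prop := out = propagar_alt lista_fosforos
instance (lista_fosforos : List Int) (out : List Int) : Decidable (Spec_propagar lista_fosforos out) := by unfold Spec_propagar; infer_instance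

-- ===== CLAIM (what is proved, stated in full; the proofs are below) =====
def Claim_equal_propagar : Prop := ∀ (lista_fosforos : List Int), Dom_propagar lista_fosforos → Spec_propagar lista_fosforos (propagar lista_fosforos)

-- ===== LEMMAS AND PROOFS =====

theorem fillDer_length (propagado : List Int) (j : Nat) :
    (fillDer propagado j).length = propagado.length := by
  fun_induction fillDer with
  | case1 l j h ih => rw [ih]; simp
  | case2 => rfl

theorem fillIzq_length (propagado : List Int) (j : Int) :
    (fillIzq propagado j).length = propagado.length := by
  fun_induction fillIzq with
  | case1 l j h ih => rw [ih]; simp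
  | case2 => rfl

-- Fill the leading zeros of a list with 1s.
def fillLead : List Int → List Int
  | [] => []
  | x :: xs => if x = 0 then 1 :: fillLead xs else x :: xs

-- Fill the trailing zeros of a list with 1s.
def fillBack (l : List Int) : List Int := (fillLead l.reverse).reverse

-- Fill the leading zeros with 1s, but never the last element (A's sentinel bound j < n - 1).
def fillFwd : List Int → List Int
  | [] => []
  | [x] => [x]
  | x :: y :: xs => if x = 0 then 1 :: fillFwd (y :: xs) else x :: y :: xs

theorem fillLead_length (l : List Int) : (fillLead l).length = l.length := by
  induction l with
  | nil => rfl
  | cons x xs ih => simp only [fillLead]; split <;> simp [ih]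

theorem fillBack_length (l : List Int) : (fillBack l).length = l.length := by
  simp [fillBack, fillLead_length]

theorem fillFwd_length (l : List Int) : (fillFwd l).length = l.length := by
  induction l with
  | nil => rfl
  | cons x xs ih =>
      cases xs with
      | nil => rfl
      | cons y ys =>
          simp only [fillFwd]
          split
          · simpa using ih
          · simp

-- A's main loop, rewritten on the processed prefix / remaining suffix split.
def loopZ (done : List Int) : List Int → List Int
  | [] => done
  | x :: todo =>
      if x = 1 then loopZ (fillBack done ++ [1]) (fillFwd todo)
      else loopZ (done ++ [x]) todo
termination_by todo => todo.length
decreasing_by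
  · simp only [fillFwd_length, List.length_cons]; omega
  · simp only [List.length_cons]; omega

theorem fillLead_cons_ne (x : Int) (xs : List Int) (hx : x ≠ 0) :
    fillLead (x :: xs) = x :: xs := by simp [fillLead, hx]

theorem fillLead_replicate_append (k : Nat) (rest : List Int) :
    fillLead (List.replicate k 0 ++ rest) = List.replicate k 1 ++ fillLead rest := by
  induction k with
  | zero => simp
  | succ n ih => simp [List.replicate_succ, fillLead, ih]

theorem fillBack_append_zero (t : List Int) : fillBack (t ++ [0]) = fillBack t ++ [1] := by
  simp [fillBack, fillLead]

theorem fillBack_append_ne (t : List Int) (x : Int) (hx : x ≠ 0) :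
    fillBack (t ++ [x]) = t ++ [x] := by
  simp [fillBack, fillLead_cons_ne x _ hx]

theorem fillBack_nil : fillBack ([] : List Int) = [] := rfl

theorem fillBack_eq_self_of_getLast (l : List Int) (v : Int) (h : l.getLast? = some v)
    (hv : v ≠ 0) : fillBack l = l := by
  obtain ⟨t, rfl⟩ := List.getLast?_eq_some_iff.mp h
  exact fillBack_append_ne t v hv

theorem fillBack_append_replicate0 (base : List Int) (run : Nat) :
    fillBack (base ++ List.replicate run 0) = fillBack base ++ List.replicate run 1 := by
  unfold fillBack
  rw [List.reverse_append, List.reverse_replicate, fillLead_replicate_append,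
    List.reverse_append, List.reverse_replicate]

theorem fillFwd_singleton (x : Int) : fillFwd [x] = [x] := rfl

theorem fillFwd_cons_cons_zero (y : Int) (ys : List Int) :
    fillFwd (0 :: y :: ys) = 1 :: fillFwd (y :: ys) := by simp [fillFwd]

theorem fillFwd_cons_cons_ne (x y : Int) (ys : List Int) (hx : x ≠ 0) :
    fillFwd (x :: y :: ys) = x :: y :: ys := by simp [fillFwd, hx]

theorem fillFwd_idem (l : List Int) : fillFwd (fillFwd l) = fillFwd l := by
  cases l with
  | nil => rfl
  | cons x xs =>
      cases xs with
      | nil => rfl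
      | cons y ys =>
          by_cases hx : x = 0
          · subst hx
            rw [fillFwd_cons_cons_zero]
            rcases hne : fillFwd (y :: ys) with _ | ⟨z, zs⟩
            · have := fillFwd_length (y :: ys); rw [hne] at this; simp at this
            · rw [fillFwd_cons_cons_ne 1 z zs one_ne_zero]
          · rw [fillFwd_cons_cons_ne x y ys hx, fillFwd_cons_cons_ne x y ys hx]

-- set/take/drop bookkeeping
theorem drop_set_succ (l : List Int) (j : Nat) (v : Int) :
    (l.set j v).drop (j + 1) = l.drop (j + 1) := by
  induction l generalizing j with
  | nil => simp
  | cons x xs ih =>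
      cases j with
      | zero => simp
      | succ n => simpa using ih n

theorem take_set_eq (l : List Int) (j : Nat) (v : Int) : (l.set j v).take j = l.take j := by
  induction l generalizing j with
  | nil => simp
  | cons x xs ih =>
      cases j with
      | zero => simp
      | succ n => simp [ih]

theorem take_set_succ (l : List Int) (j : Nat) (v : Int) (h : j < l.length) :
    (l.set j v).take (j + 1) = l.take j ++ [v] := by
  induction l generalizing j with
  | nil => simp at h
  | cons x xs ih =>
      cases j with
      | zero => simp
      | succ n =>
          simp only [List.length_cons, Nat.succ_lt_succ_iff] at h
          simp [List.set_cons_succ, List.take_succ_cons, ih n h]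

-- fillDer computes: leave take j alone, fill the leading zeros of drop j except the global last
theorem fillDer_eq (l : List Int) (j : Nat) :
    fillDer l j = l.take j ++ fillFwd (l.drop j) := by
  fun_induction fillDer with
  | case1 l j h ih =>
      obtain ⟨h0, hb⟩ := h
      rw [PySem.List.pyGet?_natCast] at h0
      obtain ⟨hj, hjv⟩ := List.getElem?_eq_some_iff.mp h0
      rw [ih, drop_set_succ, take_set_succ l j 1 hj]
      rw [List.drop_eq_getElem_cons hj, hjv]
      rcases hd1 : l.drop (j + 1) with _ | ⟨y, ys⟩
      · exfalso; have := List.drop_eq_nil_iff.mp hd1; omega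
      · rw [fillFwd_cons_cons_zero]; simp
  | case2 l j h =>
      by_cases hj : j < l.length
      · have hget : PySem.List.pyGet? l (j : Int) = some l[j] := by
          rw [PySem.List.pyGet?_natCast, List.getElem?_eq_getElem hj]
        have hdc : l.drop j = l[j] :: l.drop (j + 1) := List.drop_eq_getElem_cons hj
        by_cases h0 : l[j] = 0
        · have hb : ¬ j < l.length - 1 := fun hb => h ⟨by rw [hget, h0], hb⟩
          have hnil : l.drop (j + 1) = [] := List.drop_eq_nil_iff.mpr (by omega)
          rw [hdc, hnil, fillFwd_singleton, ← hnil, ← hdc, List.take_append_drop]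
        · rcases hd1 : l.drop (j + 1) with _ | ⟨y, ys⟩
          · rw [hdc, hd1, fillFwd_singleton, ← hd1, ← hdc, List.take_append_drop]
          · rw [hdc, hd1, fillFwd_cons_cons_ne _ _ _ h0, ← hd1, ← hdc, List.take_append_drop]
      · rw [List.drop_eq_nil_iff.mpr (by omega), List.take_of_length_le (by omega)]
        simp [fillFwd]

-- fillIzq from i-1 computes: fill the trailing zeros of take i, leave drop i alone
theorem fillIzq_eq (l : List Int) (i : Nat) (hi : i ≤ l.length) :
    fillIzq l ((i : Int) - 1) = fillBack (l.take i) ++ l.drop i := by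
  induction i generalizing l with
  | zero =>
      unfold fillIzq
      rw [dif_neg (by rintro ⟨-, h⟩; omega)]
      simp [fillBack_nil]
  | succ n ih =>
      have hn : n < l.length := by omega
      have harg : ((n + 1 : Nat) : Int) - 1 = (n : Int) := by push_cast; ring
      rw [harg]
      have hget : PySem.List.pyGet? l (n : Int) = some l[n] := by
        rw [PySem.List.pyGet?_natCast, List.getElem?_eq_getElem hn]
      by_cases h0 : l[n] = 0
      · unfold fillIzq
        rw [dif_pos ⟨by rw [hget, h0], Int.natCast_nonneg n⟩]
        have htn : ((n : Int)).toNat = n := Int.toNat_natCast n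
        rw [htn]
        have hlen : n ≤ (l.set n 1).length := by simp; omega
        rw [ih (l.set n 1) hlen]
        rw [take_set_eq]
        have hdrop' : (l.set n 1).drop n = 1 :: l.drop (n + 1) := by
          rw [List.drop_eq_getElem_cons (by simp; omega)]
          rw [drop_set_succ]
          congr 1
          simp
        rw [hdrop']
        rw [List.take_succ, List.getElem?_eq_getElem hn, h0]
        simp only [Option.toList_some]
        rw [fillBack_append_zero]
        simp
      · unfold fillIzq
        rw [dif_neg (by rintro ⟨hc, -⟩; rw [hget] at hc; exact h0 (by injection hc))]
        rw [List.take_succ, List.getElem?_eq_getElem hn]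
        simp only [Option.toList_some]
        rw [fillBack_append_ne _ _ h0]
        rw [List.append_assoc]
        have : [l[n]] ++ l.drop (n + 1) = l.drop n := (List.drop_eq_getElem_cons hn).symm
        rw [this, List.take_append_drop]

theorem recorrer_step_eq (n : Nat) : ∀ (m : Nat) (l : List Int) (i : Nat), l.length = n → i + m = n →
    (PySem.List.pyRange (i : Int) (n : Int) 1).foldl
      (fun l j =>
        if PySem.List.pyGet? l j = some 1 then
          fillIzq (fillDer l (j.toNat + 1)) (j - 1)
        else l) l
      = loopZ (l.take i) (l.drop i) := by
  intro m
  induction m with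
  | zero =>
      intro l i hl hi
      rw [show PySem.List.pyRange (i : Int) (n : Int) 1 = [] from by
        rw [PySem.List.pyRange_one]; simp [show ((n : Int) - i).toNat = 0 from by omega]]
      rw [List.foldl_nil, List.drop_eq_nil_iff.mpr (by omega),
        List.take_of_length_le (by omega), loopZ]
  | succ m ihm =>
      intro l i hl hi
      have hilt : i < n := by omega
      rw [PySem.List.pyRange_one_cons (by exact_mod_cast hilt), List.foldl_cons]
      have hcast : ((i : Int) + 1) = ((i + 1 : Nat) : Int) := by push_cast; ring
      by_cases h1 : PySem.List.pyGet? l (i : Int) = some 1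
      · rw [if_pos h1]
        have h1' := h1
        rw [PySem.List.pyGet?_natCast] at h1'
        obtain ⟨hj, hv⟩ := List.getElem?_eq_some_iff.mp h1'
        have htn : ((i : Int)).toNat = i := Int.toNat_natCast i
        set M := fillIzq (fillDer l ((i : Int).toNat + 1)) ((i : Int) - 1) with hMdef
        have hMlen : M.length = n := by
          rw [hMdef, fillIzq_length, fillDer_length]; omega
        rw [hcast, ihm M (i + 1) hMlen (by omega)]
        have htlen : (l.take (i + 1)).length = i + 1 := by simp; omega
        have hM : M = (fillBack (l.take i) ++ [1]) ++ fillFwd (l.drop (i + 1)) := by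
          rw [hMdef, htn, fillDer_eq l (i + 1), fillIzq_eq _ i (by simp [fillFwd_length]; omega)]
          rw [List.take_append_of_le_length (by omega), List.take_take,
            min_eq_left (by omega)]
          rw [List.drop_append_of_le_length (by omega), List.drop_take]
          have e1 : i + 1 - i = 1 := by omega
          rw [e1, List.drop_eq_getElem_cons hj, hv]
          simp
        have hA : (fillBack (l.take i) ++ [1] : List Int).length = i + 1 := by
          simp [fillBack_length]; omega
        rw [hM, List.take_left' hA, List.drop_left' hA,
          List.drop_eq_getElem_cons hj, hv]
        rw [show loopZ (l.take i) ((1 : Int) :: l.drop (i + 1))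
            = loopZ (fillBack (l.take i) ++ [1]) (fillFwd (l.drop (i + 1))) from by
          rw [loopZ, if_pos rfl]]
      · rw [if_neg h1]
        have hj : i < l.length := by omega
        have hv : l[i] ≠ 1 := fun hc => h1 (by
          rw [PySem.List.pyGet?_natCast, List.getElem?_eq_getElem hj, hc])
        rw [hcast, ihm l (i + 1) hl (by omega), List.drop_eq_getElem_cons hj]
        rw [show loopZ (l.take i) (l[i] :: l.drop (i + 1))
            = loopZ (l.take i ++ [l[i]]) (l.drop (i + 1)) from by rw [loopZ, if_neg hv]]
        rw [List.take_succ, List.getElem?_eq_getElem hj]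
        simp

theorem recorrer_eq (l : List Int) : recorrer l = loopZ [] l := by
  unfold recorrer
  rw [show ((0 : Int) = ((0 : Nat) : Int)) from rfl,
    recorrer_step_eq l.length l.length l 0 rfl (by omega)]
  simp

-- accumulator extraction for B's loop
theorem propagarAltLoop_acc (t : List Int) (acc : List Int) (run : Nat) (izq : Bool) :
    propagarAltLoop acc run izq t = acc ++ propagarAltLoop [] run izq t := by
  induction t generalizing acc run izq with
  | nil => simp [propagarAltLoop]
  | cons x xs ih =>
      by_cases hx : x = 0
      · simp only [propagarAltLoop, if_pos hx]; exact ih ..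
      · simp only [propagarAltLoop, if_neg hx]
        rw [ih, ih]
        simp
        rw [ih (List.replicate run (if izq = true ∨ x = 1 then (1:Int) else 0) ++ [x])]
        simp

-- with a lit left neighbour the whole pending run is emitted as 1s
theorem propagarAltLoop_true_run (t : List Int) (run : Nat) :
    propagarAltLoop [] run true t = List.replicate run 1 ++ propagarAltLoop [] 0 true t := by
  induction t generalizing run with
  | nil => simp [propagarAltLoop]
  | cons x xs ih =>
      by_cases hx : x = 0
      · simp only [propagarAltLoop, if_pos hx]
        rw [ih (run + 1), ih 1]
        simp [List.replicate_succ']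
      · simp only [propagarAltLoop, if_neg hx, Bool.true_or, if_pos]
        rw [propagarAltLoop_acc, propagarAltLoop_acc xs]
        simp
        rw [propagarAltLoop_acc xs [x]]
        simp

theorem pal_cons_ne (x : Int) (t : List Int) (run : Nat) (izq : Bool) (hx : x ≠ 0) :
    propagarAltLoop [] run izq (x :: t)
      = List.replicate run (if izq || decide (x = 1) then (1 : Int) else 0)
        ++ x :: propagarAltLoop [] 0 (decide (x = 1)) t := by
  rw [propagarAltLoop, if_neg hx,
    propagarAltLoop_acc t (([] : List Int)
      ++ List.replicate run (if izq || decide (x = 1) then (1 : Int) else 0) ++ [x])]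
  simp

-- the zipper form of A's loop equals B's loop (mutual on the two reachable state shapes)
theorem loopZ_eq (n : Nat) : ∀ todo : List Int, todo.length ≤ n →
    (∀ base run, (base = [] ∨ ∃ v, base.getLast? = some v ∧ v ≠ 0 ∧ v ≠ 1) →
      loopZ (base ++ List.replicate run 0) (todo ++ [0])
        = base ++ propagarAltLoop [] run false todo ++ [0]) ∧
    (∀ base, base.getLast? = some 1 →
      loopZ base (fillFwd (todo ++ [0])) = base ++ propagarAltLoop [] 0 true todo ++ [0]) := by
  induction n with
  | zero =>
      intro todo hlen
      have : todo = [] := List.eq_nil_of_length_eq_zero (by omega)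
      subst this
      constructor
      · intro base run _
        rw [List.nil_append, loopZ, if_neg (by norm_num), loopZ]
        simp [propagarAltLoop]
      · intro base _
        rw [List.nil_append, fillFwd_singleton, loopZ, if_neg (by norm_num), loopZ]
        simp [propagarAltLoop]
  | succ n ihn =>
      intro todo hlen
      cases todo with
      | nil =>
          constructor
          · intro base run _
            rw [List.nil_append, loopZ, if_neg (by norm_num), loopZ]
            simp [propagarAltLoop]
          · intro base _
            rw [List.nil_append, fillFwd_singleton, loopZ, if_neg (by norm_num), loopZ]
            simp [propagarAltLoop]
      | cons x t =>
          have hlt : t.length ≤ n := by simp at hlen; omega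
          constructor
          · intro base run hbase
            have hfb : fillBack (base ++ List.replicate run 0) = base ++ List.replicate run 1 := by
              rw [fillBack_append_replicate0]
              rcases hbase with rfl | ⟨v, hv, hv0, _⟩
              · rw [fillBack_nil]
              · rw [fillBack_eq_self_of_getLast base v hv hv0]
            by_cases hx1 : x = 1
            · subst hx1
              rw [List.cons_append, loopZ, if_pos rfl, hfb]
              have h2 := (ihn t hlt).2 ((base ++ List.replicate run 1) ++ [1])
                (List.getLast?_concat ..)
              rw [h2, pal_cons_ne 1 t run false one_ne_zero]
              simp
            · by_cases hx0 : x = 0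
              · subst hx0
                rw [List.cons_append, loopZ, if_neg (by norm_num)]
                have e : (base ++ List.replicate run 0) ++ [(0:Int)]
                    = base ++ List.replicate (run + 1) 0 := by
                  simp [List.replicate_succ']
                rw [e, (ihn t hlt).1 base (run + 1) hbase]
                rw [show propagarAltLoop [] run false ((0:Int) :: t)
                    = propagarAltLoop [] (run + 1) false t from by
                  rw [propagarAltLoop, if_pos rfl]]
              · rw [List.cons_append, loopZ, if_neg hx1]
                have hb2 : (base ++ List.replicate run 0) ++ [x] = [] ∨
                    ∃ v, ((base ++ List.replicate run 0) ++ [x]).getLast? = some v ∧ v ≠ 0 ∧ v ≠ 1 :=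
                  Or.inr ⟨x, List.getLast?_concat .., hx0, hx1⟩
                have h2 := (ihn t hlt).1 ((base ++ List.replicate run 0) ++ [x]) 0 hb2
                rw [List.replicate, List.append_nil] at h2
                rw [h2, pal_cons_ne x t run false hx0]
                simp [hx1]
          · intro base hb1
            have hfb : fillBack base = base :=
              fillBack_eq_self_of_getLast base 1 hb1 one_ne_zero
            obtain ⟨y, ys, hty⟩ : ∃ y ys, t ++ [(0:Int)] = y :: ys := by
              cases t with
              | nil => exact ⟨0, [], rfl⟩
              | cons a b => exact ⟨a, b ++ [0], rfl⟩
            by_cases hx0 : x = 0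
            · subst hx0
              rw [List.cons_append, hty, fillFwd_cons_cons_zero, ← hty]
              rw [loopZ, if_pos rfl, hfb, fillFwd_idem]
              rw [(ihn t hlt).2 (base ++ [1]) (List.getLast?_concat ..)]
              rw [show propagarAltLoop [] 0 true ((0:Int) :: t)
                  = propagarAltLoop [] 1 true t from by rw [propagarAltLoop, if_pos rfl]]
              rw [propagarAltLoop_true_run t 1]
              simp
            · rw [List.cons_append, hty, fillFwd_cons_cons_ne _ _ _ hx0, ← hty]
              by_cases hx1 : x = 1
              · subst hx1
                rw [loopZ, if_pos rfl, hfb]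
                rw [(ihn t hlt).2 (base ++ [1]) (List.getLast?_concat ..)]
                rw [pal_cons_ne 1 t 0 true one_ne_zero]
                simp
              · rw [loopZ, if_neg hx1]
                have hb2 : base ++ [x] = [] ∨
                    ∃ v, (base ++ [x]).getLast? = some v ∧ v ≠ 0 ∧ v ≠ 1 :=
                  Or.inr ⟨x, List.getLast?_concat .., hx0, hx1⟩
                have h2 := (ihn t hlt).1 (base ++ [x]) 0 hb2
                rw [List.replicate, List.append_nil] at h2
                rw [h2, pal_cons_ne x t 0 true hx0]
                simp [hx1]

theorem propagar_eq (xs : List Int) : propagar xs = propagar_alt xs := by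
  have hcopy : copiar_lista xs = xs := by
    unfold copiar_lista
    rw [PySem.List.foldl_append_singleton]
    simp
  have hr : recorrer (xs ++ [0]) = propagar_alt xs ++ [0] := by
    rw [recorrer_eq (xs ++ [0])]
    have h1 := (loopZ_eq xs.length xs le_rfl).1 [] 0 (Or.inl rfl)
    simp only [List.replicate, List.append_nil, List.nil_append] at h1
    rw [h1]
    rfl
  unfold propagar
  simp only [hcopy, hr]
  have hlen : ((propagar_alt xs ++ [0] : List Int).length : Int) - 1
      = (((propagar_alt xs).length : Nat) : Int) := by
    simp
  rw [hlen, PySem.List.pop?_natCast (propagar_alt xs ++ [0]) (propagar_alt xs).length (by simp)]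
  simp only []
  rw [List.eraseIdx_append_of_length_le le_rfl]
  simp

-- ===== VERDICT (by name: the statement is the Claim_ definition above) =====
theorem propagar_spec : Claim_equal_propagar := by
  intro xs _
  unfold Spec_propagar
  exact propagar_eq xs
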